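-- pv_equiv track=rewrite | github.com/manojkum4r/retail_insight_assistant | agents/lang_to_query.py | _map_plan_columns_to_schema
-- ===== SOURCE A (Python) =====
-- from typing import Dict, Any, Optional
--
-- def _map_plan_columns_to_schema(plan: Dict[str, Any], schema_map: Dict[str, str]) -> Dict[str, Any]:
--     """
--     Replace any logical names in plan['dimensions'] and plan['metrics'] with actual column names
--     based on schema_map. If schema_map doesn't have the mapping, keep the original name.
--     """
--     # map metrics if needed (e.g., 'stock' -> actual column)
--     mapped_metrics = []
--     for m in plan.get("metrics", []):
--         if not m:
--             continue
--         key = m.lower()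
--         replacement = None
--         # Common metric logical names -> schema keys
--         if key in ("stock", "units", "quantity", "qty"):
--             replacement = schema_map.get("units_sold") or schema_map.get("units") or schema_map.get("inventory") or schema_map.get("stock")
--         if key in ("revenue", "sales", "amount"):
--             replacement = schema_map.get("revenue") or schema_map.get("amount")
--         if key in ("count", "unique", "distinct"):
--             replacement = None  # count doesn't map to a single column
--         # fallback: if we got a direct mapping in schema_map
--         if not replacement and schema_map.get(m):
--             replacement = schema_map.get(m)
--         mapped_metrics.append(replacement or m)
--     plan["metrics"] = mapped_metrics
--
--     # map dimensions
--     mapped_dims = []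
--     for d in plan.get("dimensions", []):
--         if not d:
--             continue
--         # Try to map common logical dimension names to schema_map
--         key = d.lower()
--         replacement = None
--         if key in ("category", "product_category"):
--             replacement = schema_map.get("category")
--         if key in ("product_id", "sku", "sku code", "sku_code"):
--             replacement = schema_map.get("product_id") or schema_map.get("product_id")  # preserve
--         if key in ("size",):
--             replacement = schema_map.get("size")
--         if key in ("color",):
--             replacement = schema_map.get("color")
--         # fallback direct mapping
--         if not replacement and schema_map.get(d):
--             replacement = schema_map.get(d)
--         mapped_dims.append(replacement or d)
--     plan["dimensions"] = mapped_dims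
--     return plan
-- ===== SOURCE B (Python) =====
-- # B: precompute, once per call, a flat alias table mapping each lowercased
-- # logical name to its already-resolved schema column (first truthy candidate);
-- # a recursive remap then needs only two dict lookups per name.  Same in-place
-- # mutation of plan as A; objective: alternative decomposition.
--
-- _METRIC_GROUPS = [
--     (("stock", "units", "quantity", "qty"),
--      ("units_sold", "units", "inventory", "stock")),
--     (("revenue", "sales", "amount"), ("revenue", "amount")),
-- ]
--
-- _DIM_GROUPS = [
--     (("category", "product_category"), ("category",)),
--     (("product_id", "sku", "sku code", "sku_code"), ("product_id",)),
--     (("size",), ("size",)),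
--     (("color",), ("color",)),
-- ]
--
--
-- def _build_alias_table(groups, schema_map):
--     """Resolve every alias group once: alias -> first truthy schema value."""
--     table = {}
--     for aliases, candidates in groups:
--         resolved = next((schema_map[c] for c in candidates
--                          if schema_map.get(c)), None)
--         if resolved is not None:
--             for a in aliases:
--                 table[a] = resolved
--     return table
--
--
-- def _remap(names, alias_table, schema_map):
--     if not names:
--         return []
--     head, rest = names[0], _remap(names[1:], alias_table, schema_map)
--     if not head:
--         return rest
--     value = alias_table.get(head.lower()) or schema_map.get(head) or head
--     return [value] + rest
--
--
-- def _map_plan_columns_to_schema(plan, schema_map):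
--     plan["metrics"] = _remap(plan.get("metrics", []),
--                              _build_alias_table(_METRIC_GROUPS, schema_map),
--                              schema_map)
--     plan["dimensions"] = _remap(plan.get("dimensions", []),
--                                 _build_alias_table(_DIM_GROUPS, schema_map),
--                                 schema_map)
--     return plan
-- ===== Notes on version B (the rewrite author's own statement) =====
-- stated objective: alternative
-- what changed: A decides each name inside the loop with copy-pasted if-ladders and or-chains of schema lookups; B first resolves every alias group against schema_map once into a flat alias->column table, then a recursive remap handles each name with just two dict lookups and the common fallback, so the per-name ladder/candidate scan disappears.
import Mathlib
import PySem

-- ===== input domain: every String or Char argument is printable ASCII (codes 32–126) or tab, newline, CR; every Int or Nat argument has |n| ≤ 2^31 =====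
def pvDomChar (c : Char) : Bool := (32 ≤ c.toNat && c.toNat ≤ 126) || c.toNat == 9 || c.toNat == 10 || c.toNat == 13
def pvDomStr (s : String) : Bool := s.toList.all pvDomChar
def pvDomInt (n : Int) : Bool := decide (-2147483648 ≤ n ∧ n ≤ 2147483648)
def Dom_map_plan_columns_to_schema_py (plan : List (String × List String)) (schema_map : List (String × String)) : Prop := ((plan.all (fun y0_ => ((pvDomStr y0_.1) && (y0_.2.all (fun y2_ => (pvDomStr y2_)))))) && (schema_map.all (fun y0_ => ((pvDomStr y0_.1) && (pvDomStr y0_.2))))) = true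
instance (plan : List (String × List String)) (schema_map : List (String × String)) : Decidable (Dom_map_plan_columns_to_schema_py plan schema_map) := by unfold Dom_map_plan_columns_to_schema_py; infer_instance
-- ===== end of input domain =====

-- B resolves every alias group against schema_map ONCE into a flat alias table,
-- then a recursive remap does two dict lookups per name (objective: alternative
-- decomposition).  Both A and B mutate plan in place and return it; the
-- equivalence proved is about the returned dict.

-- ===== PORT A =====

-- Python truthiness of an optional string (None and "" are falsy)
def pvTruthy : Option String → Bool
  | none => false
  | some s => s ≠ ""

-- Python's `x or y` on optional strings
def pvOr (a b : Option String) : Option String := if pvTruthy a then a else b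

-- `replacement or m` where m is a plain string
def pvOrStr (a : Option String) (m : String) : String :=
  match pvOr a (some m) with
  | some s => s
  | none => m

-- body of A's first loop, for one metric name m (m ≠ "")
def aMetricOne (sm : PySem.Dict String String) (m : String) : String :=
  let key := PySem.Str.lower m
  let replacement : Option String := none
  let replacement :=
    if key = "stock" ∨ key = "units" ∨ key = "quantity" ∨ key = "qty" then
      pvOr (sm.get? "units_sold") (pvOr (sm.get? "units") (pvOr (sm.get? "inventory") (sm.get? "stock")))
    else replacement
  let replacement :=
    if key = "revenue" ∨ key = "sales" ∨ key = "amount" then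
      pvOr (sm.get? "revenue") (sm.get? "amount")
    else replacement
  let replacement :=
    if key = "count" ∨ key = "unique" ∨ key = "distinct" then none else replacement
  let replacement :=
    if ¬ pvTruthy replacement ∧ pvTruthy (sm.get? m) then sm.get? m else replacement
  pvOrStr replacement m

-- body of A's second loop, for one dimension name d (d ≠ "")
def aDimOne (sm : PySem.Dict String String) (d : String) : String :=
  let key := PySem.Str.lower d
  let replacement : Option String := none
  let replacement :=
    if key = "category" ∨ key = "product_category" then sm.get? "category" else replacement
  let replacement :=
    if key = "product_id" ∨ key = "sku" ∨ key = "sku code" ∨ key = "sku_code" then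
      pvOr (sm.get? "product_id") (sm.get? "product_id")
    else replacement
  let replacement := if key = "size" then sm.get? "size" else replacement
  let replacement := if key = "color" then sm.get? "color" else replacement
  let replacement :=
    if ¬ pvTruthy replacement ∧ pvTruthy (sm.get? d) then sm.get? d else replacement
  pvOrStr replacement d

def map_plan_columns_to_schema_py (plan : List (String × List String)) (schema_map : List (String × String)) : List (String × List String) :=
  let p := PySem.Dict.mk plan
  let sm := PySem.Dict.mk schema_map
  let mapped_metrics :=
    (p.getD "metrics" []).foldl
      (fun acc m => if m = "" then acc else acc ++ [aMetricOne sm m]) []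
  let p := p.insert "metrics" mapped_metrics
  let mapped_dims :=
    (p.getD "dimensions" []).foldl
      (fun acc d => if d = "" then acc else acc ++ [aDimOne sm d]) []
  let p := p.insert "dimensions" mapped_dims
  p.items

-- ===== PORT B =====

def bMetricGroups : List (List String × List String) :=
  [(["stock", "units", "quantity", "qty"], ["units_sold", "units", "inventory", "stock"]),
   (["revenue", "sales", "amount"], ["revenue", "amount"])]

def bDimGroups : List (List String × List String) :=
  [(["category", "product_category"], ["category"]),
   (["product_id", "sku", "sku code", "sku_code"], ["product_id"]),
   (["size"], ["size"]),
   (["color"], ["color"])]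

-- Source B's `next((schema_map[c] for c in candidates if schema_map.get(c)), None)`
def bFirstTruthy (sm : PySem.Dict String String) : List String → Option String
  | [] => none
  | c :: cs =>
    match sm.get? c with
    | some v => if v ≠ "" then some v else bFirstTruthy sm cs
    | none => bFirstTruthy sm cs

-- Source B's _build_alias_table
def bBuild (sm : PySem.Dict String String) (groups : List (List String × List String)) : PySem.Dict String String :=
  groups.foldl
    (fun t g =>
      match bFirstTruthy sm g.2 with
      | some v => g.1.foldl (fun t a => t.insert a v) t
      | none => t)
    PySem.Dict.empty

-- Source B's recursive _remap
def bRemap (table sm : PySem.Dict String String) : List String → List String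
  | [] => []
  | n :: rest =>
    let r := bRemap table sm rest
    if n = "" then r
    else pvOrStr (pvOr (table.get? (PySem.Str.lower n)) (sm.get? n)) n :: r

def map_plan_columns_to_schema_py_alt (plan : List (String × List String)) (schema_map : List (String × String)) : List (String × List String) :=
  let p := PySem.Dict.mk plan
  let sm := PySem.Dict.mk schema_map
  let p := p.insert "metrics" (bRemap (bBuild sm bMetricGroups) sm (p.getD "metrics" []))
  let p := p.insert "dimensions" (bRemap (bBuild sm bDimGroups) sm (p.getD "dimensions" []))
  p.items

-- ===== PRECONDITION & SPEC =====
def Spec_map_plan_columns_to_schema_py (plan : List (String × List String)) (schema_map : List (String × String)) (out : List (String × List String)) : Prop := out = map_plan_columns_to_schema_py_alt plan schema_map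
instance (plan : List (String × List String)) (schema_map : List (String × String)) (out : List (String × List String)) : Decidable (Spec_map_plan_columns_to_schema_py plan schema_map out) := by unfold Spec_map_plan_columns_to_schema_py; infer_instance

-- ===== CLAIM (what is proved, stated in full; the proofs are below) =====
def Claim_equal_map_plan_columns_to_schema_py : Prop := ∀ (plan : List (String × List String)) (schema_map : List (String × String)), Dom_map_plan_columns_to_schema_py plan schema_map → Spec_map_plan_columns_to_schema_py plan schema_map (map_plan_columns_to_schema_py plan schema_map)

-- ===== LEMMAS AND PROOFS =====

lemma pvTruthy_none : pvTruthy none = false := rfl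

lemma pvTruthy_some_ne {s : String} (h : s ≠ "") : pvTruthy (some s) = true := by
  simp [pvTruthy, h]

lemma pvOr_of_truthy {a b : Option String} (h : pvTruthy a = true) : pvOr a b = a := by
  simp [pvOr, h]

lemma pvOr_of_falsy {a b : Option String} (h : pvTruthy a = false) : pvOr a b = b := by
  simp [pvOr, h]

lemma pvOr_self (a : Option String) : pvOr a a = a := by
  unfold pvOr; split <;> rfl

lemma pvOrStr_of_falsy {a : Option String} {m : String} (h : pvTruthy a = false) :
    pvOrStr a m = m := by
  simp [pvOrStr, pvOr_of_falsy h]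

-- A's right-nested `or` chain of schema lookups, as a function of the key list
def chainOr (sm : PySem.Dict String String) : List String → Option String
  | [] => none
  | [k] => sm.get? k
  | k :: k' :: ks => pvOr (sm.get? k) (chainOr sm (k' :: ks))

lemma bFirstTruthy_cons (sm : PySem.Dict String String) (k : String) (ks : List String) :
    bFirstTruthy sm (k :: ks) =
      match sm.get? k with
      | some v => if v ≠ "" then some v else bFirstTruthy sm ks
      | none => bFirstTruthy sm ks := rfl

-- relation between A's `or`-chain and B's first-truthy generator over the same keys
lemma chain_cases (sm : PySem.Dict String String) :
    ∀ ks : List String,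
      (bFirstTruthy sm ks = none ∧ pvTruthy (chainOr sm ks) = false) ∨
      (∃ v, bFirstTruthy sm ks = some v ∧ chainOr sm ks = some v ∧ v ≠ "") := by
  intro ks
  induction ks with
  | nil => left; exact ⟨rfl, rfl⟩
  | cons k ks ih =>
    cases h : sm.get? k with
    | none =>
      cases ks with
      | nil => left; exact ⟨by rw [bFirstTruthy_cons, h]; rfl, by simp [chainOr, h, pvTruthy_none]⟩
      | cons k' ks' =>
        have hchain : chainOr sm (k :: k' :: ks') = chainOr sm (k' :: ks') := by
          simp only [chainOr]; rw [h, pvOr_of_falsy pvTruthy_none]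
        rcases ih with ⟨h1, h2⟩ | ⟨v, h1, h2, h3⟩
        · left; exact ⟨by rw [bFirstTruthy_cons, h]; exact h1, by rw [hchain]; exact h2⟩
        · right; exact ⟨v, by rw [bFirstTruthy_cons, h]; exact h1, by rw [hchain]; exact h2, h3⟩
    | some v =>
      by_cases hv : v = ""
      · subst hv
        cases ks with
        | nil => left; exact ⟨by rw [bFirstTruthy_cons, h]; simp [bFirstTruthy], by simp [chainOr, h]; rfl⟩
        | cons k' ks' =>
          have hchain : chainOr sm (k :: k' :: ks') = chainOr sm (k' :: ks') := by
            simp only [chainOr]; rw [h, pvOr_of_falsy rfl]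
          rcases ih with ⟨h1, h2⟩ | ⟨w, h1, h2, h3⟩
          · left; exact ⟨by rw [bFirstTruthy_cons, h]; simpa using h1, by rw [hchain]; exact h2⟩
          · right; exact ⟨w, by rw [bFirstTruthy_cons, h]; simpa using h1, by rw [hchain]; exact h2, h3⟩
      · right
        refine ⟨v, by rw [bFirstTruthy_cons, h]; simp [hv], ?_, hv⟩
        cases ks with
        | nil => simp [chainOr, h]
        | cons k' ks' =>
          simp only [chainOr]; rw [h, pvOr_of_truthy (pvTruthy_some_ne hv)]

-- core: A's tail (or-chain, fallback, `or m`) = B's tail (resolved value, double fallback)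
lemma tail_eq (sm : PySem.Dict String String) (m : String) (ks : List String) :
    pvOrStr (if ¬ pvTruthy (chainOr sm ks) ∧ pvTruthy (sm.get? m) then sm.get? m else chainOr sm ks) m
      = pvOrStr (pvOr (bFirstTruthy sm ks) (sm.get? m)) m := by
  rcases chain_cases sm ks with ⟨h1, h2⟩ | ⟨v, h1, h2, h3⟩
  · rw [h1, pvOr_of_falsy pvTruthy_none]
    by_cases hm : pvTruthy (sm.get? m) = true
    · rw [if_pos ⟨by simp [h2], hm⟩]
    · rw [if_neg (fun hc => hm hc.2)]
      have hm' : pvTruthy (sm.get? m) = false := by simpa using hm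
      rw [pvOrStr_of_falsy h2, pvOrStr_of_falsy hm']
  · rw [h1, h2, pvOr_of_truthy (pvTruthy_some_ne h3),
      if_neg (fun hc => hc.1 (pvTruthy_some_ne h3))]

-- what the precomputed metric alias table answers for any key
lemma metric_table_get (sm : PySem.Dict String String) (k : String) :
    (bBuild sm bMetricGroups).get? k =
      if k = "stock" ∨ k = "units" ∨ k = "quantity" ∨ k = "qty" then
        bFirstTruthy sm ["units_sold", "units", "inventory", "stock"]
      else if k = "revenue" ∨ k = "sales" ∨ k = "amount" then
        bFirstTruthy sm ["revenue", "amount"]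
      else none := by
  unfold bBuild bMetricGroups
  simp only [List.foldl]
  cases h1 : bFirstTruthy sm ["units_sold", "units", "inventory", "stock"] with
  | none =>
    cases h2 : bFirstTruthy sm ["revenue", "amount"] with
    | none => split_ifs with ha hb <;> simp [PySem.Dict.get?_empty]
    | some v2 =>
      simp only [PySem.Dict.get?_insert, PySem.Dict.get?_empty]
      split_ifs <;> simp_all
  | some v1 =>
    cases h2 : bFirstTruthy sm ["revenue", "amount"] with
    | none =>
      simp only [PySem.Dict.get?_insert, PySem.Dict.get?_empty]
      split_ifs <;> simp_all
    | some v2 =>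
      simp only [PySem.Dict.get?_insert, PySem.Dict.get?_empty]
      split_ifs <;> simp_all

-- what the precomputed dimension alias table answers for any key
lemma dim_table_get (sm : PySem.Dict String String) (k : String) :
    (bBuild sm bDimGroups).get? k =
      if k = "category" ∨ k = "product_category" then bFirstTruthy sm ["category"]
      else if k = "product_id" ∨ k = "sku" ∨ k = "sku code" ∨ k = "sku_code" then
        bFirstTruthy sm ["product_id"]
      else if k = "size" then bFirstTruthy sm ["size"]
      else if k = "color" then bFirstTruthy sm ["color"]
      else none := by
  unfold bBuild bDimGroups
  simp only [List.foldl]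
  cases h1 : bFirstTruthy sm ["category"] <;>
    cases h2 : bFirstTruthy sm ["product_id"] <;>
      cases h3 : bFirstTruthy sm ["size"] <;>
        cases h4 : bFirstTruthy sm ["color"] <;>
          · simp only [PySem.Dict.get?_insert, PySem.Dict.get?_empty]
            split_ifs <;> simp_all

-- per-element agreement: A's metric if-ladder = B's table lookup with fallbacks
lemma metric_one_eq (sm : PySem.Dict String String) (m : String) :
    aMetricOne sm m =
      pvOrStr (pvOr ((bBuild sm bMetricGroups).get? (PySem.Str.lower m)) (sm.get? m)) m := by
  unfold aMetricOne
  rw [metric_table_get]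
  by_cases hg1 : PySem.Str.lower m = "stock" ∨ PySem.Str.lower m = "units" ∨
      PySem.Str.lower m = "quantity" ∨ PySem.Str.lower m = "qty"
  · have hg2 : ¬(PySem.Str.lower m = "revenue" ∨ PySem.Str.lower m = "sales" ∨
        PySem.Str.lower m = "amount") := by rcases hg1 with h | h | h | h <;> simp [h]
    have hg3 : ¬(PySem.Str.lower m = "count" ∨ PySem.Str.lower m = "unique" ∨
        PySem.Str.lower m = "distinct") := by rcases hg1 with h | h | h | h <;> simp [h]
    simp only [if_pos hg1, if_neg hg2, if_neg hg3]
    simpa [chainOr] using tail_eq sm m ["units_sold", "units", "inventory", "stock"]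
  · by_cases hg2 : PySem.Str.lower m = "revenue" ∨ PySem.Str.lower m = "sales" ∨
        PySem.Str.lower m = "amount"
    · have hg3 : ¬(PySem.Str.lower m = "count" ∨ PySem.Str.lower m = "unique" ∨
          PySem.Str.lower m = "distinct") := by rcases hg2 with h | h | h <;> simp [h]
      simp only [if_neg hg1, if_pos hg2, if_neg hg3]
      simpa [chainOr] using tail_eq sm m ["revenue", "amount"]
    · simp only [if_neg hg1, if_neg hg2, ite_self]
      simpa [chainOr] using tail_eq sm m []

-- per-element agreement: A's dimension if-ladder = B's table lookup with fallbacks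
lemma dim_one_eq (sm : PySem.Dict String String) (d : String) :
    aDimOne sm d =
      pvOrStr (pvOr ((bBuild sm bDimGroups).get? (PySem.Str.lower d)) (sm.get? d)) d := by
  unfold aDimOne
  rw [dim_table_get]
  by_cases hg1 : PySem.Str.lower d = "category" ∨ PySem.Str.lower d = "product_category"
  · have hg2 : ¬(PySem.Str.lower d = "product_id" ∨ PySem.Str.lower d = "sku" ∨
        PySem.Str.lower d = "sku code" ∨ PySem.Str.lower d = "sku_code") := by
      rcases hg1 with h | h <;> simp [h]
    have hg3 : ¬PySem.Str.lower d = "size" := by rcases hg1 with h | h <;> simp [h]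
    have hg4 : ¬PySem.Str.lower d = "color" := by rcases hg1 with h | h <;> simp [h]
    simp only [if_pos hg1, if_neg hg2, if_neg hg3, if_neg hg4]
    simpa [chainOr] using tail_eq sm d ["category"]
  · by_cases hg2 : PySem.Str.lower d = "product_id" ∨ PySem.Str.lower d = "sku" ∨
        PySem.Str.lower d = "sku code" ∨ PySem.Str.lower d = "sku_code"
    · have hg3 : ¬PySem.Str.lower d = "size" := by rcases hg2 with h | h | h | h <;> simp [h]
      have hg4 : ¬PySem.Str.lower d = "color" := by rcases hg2 with h | h | h | h <;> simp [h]
      simp only [if_neg hg1, if_pos hg2, if_neg hg3, if_neg hg4, pvOr_self]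
      simpa [chainOr] using tail_eq sm d ["product_id"]
    · by_cases hg3 : PySem.Str.lower d = "size"
      · have hg4 : ¬PySem.Str.lower d = "color" := by simp [hg3]
        simp only [if_neg hg1, if_neg hg2, if_pos hg3, if_neg hg4]
        simpa [chainOr] using tail_eq sm d ["size"]
      · by_cases hg4 : PySem.Str.lower d = "color"
        · simp only [if_neg hg1, if_neg hg2, if_neg hg3, if_pos hg4]
          simpa [chainOr] using tail_eq sm d ["color"]
        · simp only [if_neg hg1, if_neg hg2, if_neg hg3, if_neg hg4]
          simpa [chainOr] using tail_eq sm d []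

-- loop shape: A's foldl-with-append equals B's recursive remap
lemma fold_eq_remap (aOne : String → String) (table sm : PySem.Dict String String)
    (h : ∀ n, aOne n = pvOrStr (pvOr (table.get? (PySem.Str.lower n)) (sm.get? n)) n) :
    ∀ (names : List String) (acc : List String),
      names.foldl (fun acc n => if n = "" then acc else acc ++ [aOne n]) acc
        = acc ++ bRemap table sm names := by
  intro names
  induction names with
  | nil => intro acc; simp [bRemap]
  | cons n rest ih =>
    intro acc
    have hb : bRemap table sm (n :: rest) =
        if n = "" then bRemap table sm rest
        else pvOrStr (pvOr (table.get? (PySem.Str.lower n)) (sm.get? n)) n :: bRemap table sm rest := rfl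
    by_cases hn : n = ""
    · simp only [List.foldl, hb, if_pos hn]; exact ih acc
    · simp only [List.foldl, hb, if_neg hn]
      rw [ih, h n, List.append_assoc, List.singleton_append]

-- ===== VERDICT (by name: the statement is the Claim_ definition above) =====
theorem map_plan_columns_to_schema_py_spec : Claim_equal_map_plan_columns_to_schema_py := by
  intro plan schema_map _
  unfold Spec_map_plan_columns_to_schema_py
  simp only [map_plan_columns_to_schema_py, map_plan_columns_to_schema_py_alt,
    fold_eq_remap (aMetricOne (PySem.Dict.mk schema_map)) (bBuild (PySem.Dict.mk schema_map) bMetricGroups)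
      (PySem.Dict.mk schema_map) (metric_one_eq (PySem.Dict.mk schema_map)),
    fold_eq_remap (aDimOne (PySem.Dict.mk schema_map)) (bBuild (PySem.Dict.mk schema_map) bDimGroups)
      (PySem.Dict.mk schema_map) (dim_one_eq (PySem.Dict.mk schema_map)),
    List.nil_append]
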